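-- pv_equiv track=rewrite | github.com/PedroLauand/EvansScenario | Indices.py | evansmarginalA4
-- ===== SOURCE A (Python) =====
-- def evansmarginalA4(a0,a1,c0,c1):
--     #Index for marginal joint distribution q(a0,a1,c0,c1) for evans scenario where |A|=3, |C|=2.
--     i=0
--     for C1 in range(2):
--         for C0 in range(2):
--             for A1 in range(4):
--                 for A0 in range(4):
--                     if C1==c1 and C0==c0 and A1==a1 and A0==a0 :
--                         return i
--                     else :
--                         i=i+1
-- ===== SOURCE B (Python) =====
-- def evansmarginalA4(a0, a1, c0, c1):
--     # Closed form: the scan order makes A0 the fastest axis, then A1, C0, C1.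
--     if 0 <= a0 < 4 and 0 <= a1 < 4 and 0 <= c0 < 2 and 0 <= c1 < 2:
--         return a0 + 4 * a1 + 16 * c0 + 32 * c1
--     return None
-- ===== Notes on version B (the rewrite author's own statement) =====
-- stated objective: faster
-- what changed: Replaces the 64-iteration 4-deep nested scan with range guards plus the closed-form index a0 + 4*a1 + 16*c0 + 32*c1.
import Mathlib
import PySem

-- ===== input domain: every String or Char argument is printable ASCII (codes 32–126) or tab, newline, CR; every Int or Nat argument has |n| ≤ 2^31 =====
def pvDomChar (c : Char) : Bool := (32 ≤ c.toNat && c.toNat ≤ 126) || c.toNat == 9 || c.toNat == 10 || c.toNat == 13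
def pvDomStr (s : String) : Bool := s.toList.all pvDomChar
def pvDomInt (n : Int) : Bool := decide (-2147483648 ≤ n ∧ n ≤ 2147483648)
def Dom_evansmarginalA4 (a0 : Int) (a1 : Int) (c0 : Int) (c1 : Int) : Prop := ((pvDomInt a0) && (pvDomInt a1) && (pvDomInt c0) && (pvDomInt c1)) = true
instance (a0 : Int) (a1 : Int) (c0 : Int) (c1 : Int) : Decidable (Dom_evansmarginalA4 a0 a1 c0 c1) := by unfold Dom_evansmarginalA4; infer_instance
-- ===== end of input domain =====

-- B replaces A's 64-iteration nested scan with a range-guarded closed-form index (objective: faster, constant factor).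

-- ===== PORT A =====
-- innermost loop `for A0 in range(4)`: returns (early-return value if any, updated counter i)
def pvLoopA0 (a0 a1 c0 c1 C1 C0 A1 : Int) : List Int → Int → Option Int × Int
  | [], i => (none, i)
  | A0 :: rest, i =>
    if C1 = c1 ∧ C0 = c0 ∧ A1 = a1 ∧ A0 = a0 then (some i, i)
    else pvLoopA0 a0 a1 c0 c1 C1 C0 A1 rest (i + 1)

-- `for A1 in range(4)`
def pvLoopA1 (a0 a1 c0 c1 C1 C0 : Int) : List Int → Int → Option Int × Int
  | [], i => (none, i)
  | A1 :: rest, i =>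
    match pvLoopA0 a0 a1 c0 c1 C1 C0 A1 (PySem.List.pyRange 0 4 1) i with
    | (some r, i') => (some r, i')
    | (none, i') => pvLoopA1 a0 a1 c0 c1 C1 C0 rest i'

-- `for C0 in range(2)`
def pvLoopC0 (a0 a1 c0 c1 C1 : Int) : List Int → Int → Option Int × Int
  | [], i => (none, i)
  | C0 :: rest, i =>
    match pvLoopA1 a0 a1 c0 c1 C1 C0 (PySem.List.pyRange 0 4 1) i with
    | (some r, i') => (some r, i')
    | (none, i') => pvLoopC0 a0 a1 c0 c1 C1 rest i'

-- `for C1 in range(2)`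
def pvLoopC1 (a0 a1 c0 c1 : Int) : List Int → Int → Option Int × Int
  | [], i => (none, i)
  | C1 :: rest, i =>
    match pvLoopC0 a0 a1 c0 c1 C1 (PySem.List.pyRange 0 2 1) i with
    | (some r, i') => (some r, i')
    | (none, i') => pvLoopC1 a0 a1 c0 c1 rest i'

-- the function falls off the end (returns None) when the loops finish without a hit
def evansmarginalA4 (a0 : Int) (a1 : Int) (c0 : Int) (c1 : Int) : Option Int :=
  (pvLoopC1 a0 a1 c0 c1 (PySem.List.pyRange 0 2 1) 0).1

-- ===== PORT B =====
def evansmarginalA4_alt (a0 : Int) (a1 : Int) (c0 : Int) (c1 : Int) : Option Int :=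
  if 0 ≤ a0 ∧ a0 < 4 ∧ 0 ≤ a1 ∧ a1 < 4 ∧ 0 ≤ c0 ∧ c0 < 2 ∧ 0 ≤ c1 ∧ c1 < 2 then
    some (a0 + 4 * a1 + 16 * c0 + 32 * c1)
  else none

-- ===== PRECONDITION & SPEC =====
def Spec_evansmarginalA4 (a0 : Int) (a1 : Int) (c0 : Int) (c1 : Int) (out : Option Int) : Prop := out = evansmarginalA4_alt a0 a1 c0 c1
instance (a0 : Int) (a1 : Int) (c0 : Int) (c1 : Int) (out : Option Int) : Decidable (Spec_evansmarginalA4 a0 a1 c0 c1 out) := by unfold Spec_evansmarginalA4; infer_instance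

-- ===== CLAIM (what is proved, stated in full; the proofs are below) =====
def Claim_equal_evansmarginalA4 : Prop := ∀ (a0 : Int) (a1 : Int) (c0 : Int) (c1 : Int), Dom_evansmarginalA4 a0 a1 c0 c1 → Spec_evansmarginalA4 a0 a1 c0 c1 (evansmarginalA4 a0 a1 c0 c1)

-- ===== LEMMAS AND PROOFS =====

-- innermost loop, no hit in L: counter advances by |L|
theorem l0_skip (a0 a1 c0 c1 C1 C0 A1 : Int) (L : List Int) (i : Int)
    (h : ¬(C1 = c1 ∧ C0 = c0 ∧ A1 = a1 ∧ a0 ∈ L)) :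
    pvLoopA0 a0 a1 c0 c1 C1 C0 A1 L i = (none, i + L.length) := by
  induction L generalizing i with
  | nil => simp [pvLoopA0]
  | cons x t ih =>
    have hx : ¬(C1 = c1 ∧ C0 = c0 ∧ A1 = a1 ∧ x = a0) :=
      fun ⟨p, q, r, s⟩ => h ⟨p, q, r, s ▸ List.mem_cons_self⟩
    have ht : ¬(C1 = c1 ∧ C0 = c0 ∧ A1 = a1 ∧ a0 ∈ t) :=
      fun ⟨p, q, r, s⟩ => h ⟨p, q, r, List.mem_cons_of_mem _ s⟩
    rw [pvLoopA0, if_neg hx, ih _ ht]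
    congr 1
    push_cast [List.length_cons]
    ring

-- innermost loop, hit: returns i advanced by a0
theorem l0_hit (a0 a1 c0 c1 C1 C0 A1 : Int) (i : Int)
    (h1 : C1 = c1) (h2 : C0 = c0) (h3 : A1 = a1) (h4 : 0 ≤ a0) (h5 : a0 < 4) :
    pvLoopA0 a0 a1 c0 c1 C1 C0 A1 [0, 1, 2, 3] i = (some (i + a0), i + a0) := by
  subst h1; subst h2; subst h3
  interval_cases a0 <;> simp [pvLoopA0] <;> ring

theorem l0_eq (a0 a1 c0 c1 C1 C0 A1 : Int) (i : Int) :
    pvLoopA0 a0 a1 c0 c1 C1 C0 A1 [0, 1, 2, 3] i =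
      if C1 = c1 ∧ C0 = c0 ∧ A1 = a1 ∧ 0 ≤ a0 ∧ a0 < 4 then (some (i + a0), i + a0)
      else (none, i + 4) := by
  split_ifs with h
  · exact l0_hit a0 a1 c0 c1 C1 C0 A1 i h.1 h.2.1 h.2.2.1 h.2.2.2.1 h.2.2.2.2
  · have := l0_skip a0 a1 c0 c1 C1 C0 A1 [0, 1, 2, 3] i
      (fun ⟨p, q, r, s⟩ => h ⟨p, q, r, by simp at s; omega⟩)
    simpa using this

theorem l1_eq (a0 a1 c0 c1 C1 C0 : Int) (i : Int) :
    pvLoopA1 a0 a1 c0 c1 C1 C0 [0, 1, 2, 3] i =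
      if C1 = c1 ∧ C0 = c0 ∧ 0 ≤ a0 ∧ a0 < 4 ∧ 0 ≤ a1 ∧ a1 < 4 then
        (some (i + a0 + 4 * a1), i + a0 + 4 * a1)
      else (none, i + 16) := by
  have hr : PySem.List.pyRange 0 4 1 = [0, 1, 2, 3] := by decide
  simp only [pvLoopA1, hr, l0_eq]
  split_ifs <;> simp_all <;> omega

theorem l2_eq (a0 a1 c0 c1 C1 : Int) (i : Int) :
    pvLoopC0 a0 a1 c0 c1 C1 [0, 1] i =
      if C1 = c1 ∧ 0 ≤ a0 ∧ a0 < 4 ∧ 0 ≤ a1 ∧ a1 < 4 ∧ 0 ≤ c0 ∧ c0 < 2 then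
        (some (i + a0 + 4 * a1 + 16 * c0), i + a0 + 4 * a1 + 16 * c0)
      else (none, i + 32) := by
  have hr : PySem.List.pyRange 0 4 1 = [0, 1, 2, 3] := by decide
  simp only [pvLoopC0, hr, l1_eq]
  split_ifs <;> simp_all <;> omega

theorem l3_eq (a0 a1 c0 c1 : Int) (i : Int) :
    pvLoopC1 a0 a1 c0 c1 [0, 1] i =
      if 0 ≤ a0 ∧ a0 < 4 ∧ 0 ≤ a1 ∧ a1 < 4 ∧ 0 ≤ c0 ∧ c0 < 2 ∧ 0 ≤ c1 ∧ c1 < 2 then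
        (some (i + a0 + 4 * a1 + 16 * c0 + 32 * c1), i + a0 + 4 * a1 + 16 * c0 + 32 * c1)
      else (none, i + 64) := by
  have hr : PySem.List.pyRange 0 2 1 = [0, 1] := by decide
  simp only [pvLoopC1, hr, l2_eq]
  split_ifs <;> simp_all <;> omega

theorem evansmarginalA4_eq_alt (a0 a1 c0 c1 : Int) :
    evansmarginalA4 a0 a1 c0 c1 = evansmarginalA4_alt a0 a1 c0 c1 := by
  have hr : PySem.List.pyRange 0 2 1 = [0, 1] := by decide
  rw [evansmarginalA4, hr, l3_eq, evansmarginalA4_alt]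
  split_ifs <;> simp

-- ===== VERDICT (by name: the statement is the Claim_ definition above) =====
theorem evansmarginalA4_spec : Claim_equal_evansmarginalA4 := by
  intro a0 a1 c0 c1 _
  exact evansmarginalA4_eq_alt a0 a1 c0 c1
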